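-- pv_equiv track=rewrite | github.com/crishonsou/hackerrank_solutions_submissions | hackerhank_compare_triplets.py | solve
-- ===== SOURCE A (Python) =====
-- def solve(a, b):
--     score_a = score_b = 0
--     # loop over each element and compare with corresponding element in other array
--     for i, elem in enumerate(a):
--         if elem > b[i]:
--             score_a = score_a + 1
--         elif elem == b[i]:
--             pass
--         elif elem < b[i]:
--             score_b = score_b + 1
--
--     return '{}{}'.format(score_a, score_b)
-- ===== SOURCE B (Python) =====
-- def solve(a, b):
--     n = len(a)
--     score_a = sum(1 for i in range(n) if a[i] > b[i])
--     score_b = sum(1 for i in range(n) if a[i] < b[i])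
--     return '{}{}'.format(score_a, score_b)
-- ===== Notes on version B (the rewrite author's own statement) =====
-- stated objective: simpler
-- what changed: Replaces the single stateful loop carrying two counters through a three-way if/elif chain with two independent one-condition counting scans (sum of a generator per side).
import Mathlib
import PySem

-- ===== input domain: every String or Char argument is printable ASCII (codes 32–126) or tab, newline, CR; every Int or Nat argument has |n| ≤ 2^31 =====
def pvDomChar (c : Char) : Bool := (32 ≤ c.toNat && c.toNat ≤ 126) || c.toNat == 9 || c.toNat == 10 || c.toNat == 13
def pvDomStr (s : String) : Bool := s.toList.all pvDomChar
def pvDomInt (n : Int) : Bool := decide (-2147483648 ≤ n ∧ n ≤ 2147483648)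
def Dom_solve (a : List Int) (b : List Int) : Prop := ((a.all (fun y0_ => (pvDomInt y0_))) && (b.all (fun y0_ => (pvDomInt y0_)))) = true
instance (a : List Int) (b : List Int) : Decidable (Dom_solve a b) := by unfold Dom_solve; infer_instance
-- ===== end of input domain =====

-- B computes the two scores in two independent counting scans instead of A's single loop threading both counters (objective: simpler).

-- ===== PORT A =====
def solve (a : List Int) (b : List Int) : String :=
  let res := (PySem.List.enumerate a).foldl
    (fun (s : Int × Int) (p : Int × Int) =>
      if p.2 > PySem.List.pyGetD b p.1 0 then (s.1 + 1, s.2)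
      else if p.2 = PySem.List.pyGetD b p.1 0 then s
      else if p.2 < PySem.List.pyGetD b p.1 0 then (s.1, s.2 + 1)
      else s)
    ((0 : Int), (0 : Int))
  PySem.Int.toStr res.1 ++ PySem.Int.toStr res.2

-- ===== PORT B =====
def solve_alt (a : List Int) (b : List Int) : String :=
  let n : Int := a.length
  let score_a : Int := (PySem.List.pyRange 0 n 1).foldl
    (fun (s : Int) (i : Int) =>
      if PySem.List.pyGetD a i 0 > PySem.List.pyGetD b i 0 then s + 1 else s) 0
  let score_b : Int := (PySem.List.pyRange 0 n 1).foldl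
    (fun (s : Int) (i : Int) =>
      if PySem.List.pyGetD a i 0 < PySem.List.pyGetD b i 0 then s + 1 else s) 0
  PySem.Int.toStr score_a ++ PySem.Int.toStr score_b

-- ===== PRECONDITION & SPEC =====
-- Pre_ excludes exactly the inputs where b is shorter than a: there Python A raises IndexError at b[i] (and B raises too).
def Pre_solve (a : List Int) (b : List Int) : Prop := a.length ≤ b.length
instance (a : List Int) (b : List Int) : Decidable (Pre_solve a b) := by unfold Pre_solve; infer_instance
def pvWitness_solve : List Int × List Int := ([1, 2, 3], [3, 2, 1])

def Spec_solve (a : List Int) (b : List Int) (out : String) : Prop := out = solve_alt a b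
instance (a : List Int) (b : List Int) (out : String) : Decidable (Spec_solve a b out) := by unfold Spec_solve; infer_instance

-- ===== CLAIM (what is proved, stated in full; the proofs are below) =====
def Claim_equal_solve : Prop := ∀ (a : List Int) (b : List Int), Dom_solve a b → Pre_solve a b → Spec_solve a b (solve a b)

-- ===== LEMMAS AND PROOFS =====

-- A's combined fold, started at index k with accumulators (sa, sb), adds the two counts over zip a (b.drop k).
theorem lemA (b : List Int) :
    ∀ (a : List Int) (k : Nat) (sa sb : Int), a.length + k ≤ b.length →
    (PySem.List.enumerate a (k : Int)).foldl
      (fun (s : Int × Int) (p : Int × Int) =>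
        if p.2 > PySem.List.pyGetD b p.1 0 then (s.1 + 1, s.2)
        else if p.2 = PySem.List.pyGetD b p.1 0 then s
        else if p.2 < PySem.List.pyGetD b p.1 0 then (s.1, s.2 + 1)
        else s) (sa, sb)
    = (sa + ((a.zip (b.drop k)).countP (fun p => decide (p.1 > p.2)) : Int),
       sb + ((a.zip (b.drop k)).countP (fun p => decide (p.1 < p.2)) : Int)) := by
  intro a
  induction a with
  | nil => intro k sa sb _; simp [PySem.List.enumerate]
  | cons x xs ih =>
    intro k sa sb hlen
    have hk : k < b.length := by simp at hlen; omega
    have hget : PySem.List.pyGetD b (k : Int) 0 = b[k] := by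
      rw [PySem.List.pyGetD_natCast]; exact List.getD_eq_getElem b 0 hk
    have hdrop : b.drop k = b[k] :: b.drop (k + 1) := List.drop_eq_getElem_cons hk
    have hcast : ((k : Int) + 1) = ((k + 1 : Nat) : Int) := by push_cast; ring
    rw [PySem.List.enumerate_cons, List.foldl_cons]
    simp only [hget, hcast]
    rcases lt_trichotomy x b[k] with h | h | h
    · rw [if_neg (by omega), if_neg (by omega), if_pos h,
        ih (k + 1) sa (sb + 1) (by simp at hlen ⊢; omega), hdrop]
      simp only [List.zip_cons_cons, List.countP_cons, decide_eq_true h,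
        decide_eq_false (show ¬ (x > b[k]) by omega), Prod.mk.injEq]
      constructor <;> push_cast <;> ring
    · rw [if_neg (by omega), if_pos h,
        ih (k + 1) sa sb (by simp at hlen ⊢; omega), hdrop]
      simp only [List.zip_cons_cons, List.countP_cons,
        decide_eq_false (show ¬ (x > b[k]) by omega),
        decide_eq_false (show ¬ (x < b[k]) by omega), Prod.mk.injEq]
      constructor <;> push_cast <;> ring
    · rw [if_pos h, ih (k + 1) (sa + 1) sb (by simp at hlen ⊢; omega), hdrop]
      simp only [List.zip_cons_cons, List.countP_cons, decide_eq_true h,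
        decide_eq_false (show ¬ (x < b[k]) by omega), Prod.mk.injEq]
      constructor <;> push_cast <;> ring

-- B's single-condition counting scan over range(k, len a), for any decidable comparison.
theorem lemB (P : Int → Int → Prop) [inst : DecidableRel P] (a b : List Int)
    (hlen : a.length ≤ b.length) :
    ∀ (n k : Nat), k + n = a.length → ∀ (s : Int),
    (PySem.List.pyRange (k : Int) (a.length : Int) 1).foldl
      (fun (s : Int) (i : Int) =>
        if P (PySem.List.pyGetD a i 0) (PySem.List.pyGetD b i 0) then s + 1 else s) s
    = s + (((a.drop k).zip (b.drop k)).countP (fun p => decide (P p.1 p.2)) : Int) := by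
  intro n
  induction n with
  | zero =>
    intro k hk s
    rw [PySem.List.pyRange_one_eq_nil (by omega)]
    simp [List.drop_eq_nil_of_le (by omega : a.length ≤ k)]
  | succ m ih =>
    intro k hk s
    have hka : k < a.length := by omega
    have hkb : k < b.length := by omega
    have hga : PySem.List.pyGetD a (k : Int) 0 = a[k] := by
      rw [PySem.List.pyGetD_natCast]; exact List.getD_eq_getElem a 0 hka
    have hgb : PySem.List.pyGetD b (k : Int) 0 = b[k] := by
      rw [PySem.List.pyGetD_natCast]; exact List.getD_eq_getElem b 0 hkb
    have hcast : ((k : Int) + 1) = ((k + 1 : Nat) : Int) := by push_cast; ring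
    rw [PySem.List.pyRange_one_cons (by exact_mod_cast hka), List.foldl_cons]
    simp only [hga, hgb, hcast]
    by_cases h : P a[k] b[k]
    · rw [if_pos h, ih (k + 1) (by omega) (s + 1),
        List.drop_eq_getElem_cons hka, List.drop_eq_getElem_cons hkb]
      simp only [List.zip_cons_cons, List.countP_cons, decide_eq_true h]
      push_cast
      ring
    · rw [if_neg h, ih (k + 1) (by omega) s,
        List.drop_eq_getElem_cons hka, List.drop_eq_getElem_cons hkb]
      simp only [List.zip_cons_cons, List.countP_cons, decide_eq_false h]
      push_cast
      ring

-- ===== VERDICT (by name: the statement is the Claim_ definition above) =====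
theorem solve_spec : Claim_equal_solve := by
  intro a b _ hpre
  unfold Spec_solve solve solve_alt
  have hA := lemA b a 0 0 0 (by simpa using hpre)
  have hB1 := lemB (· > ·) a b hpre a.length 0 (by omega) 0
  have hB2 := lemB (· < ·) a b hpre a.length 0 (by omega) 0
  simp only [Nat.cast_zero, List.drop_zero] at hA hB1 hB2
  simp only [hA, hB1, hB2, zero_add]
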